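-- pv_equiv track=rewrite | github.com/psgebeli/phys540 | classes/class38/perm3.py | fact2int
-- ===== SOURCE A (Python) =====
-- def is_valid_fact(f):
--     # factoradic
--     # f[0] + 2!*f[1] + 3!*f[2] + ... + (n-1)!*f[n-2]
--     # in the form of a list f = [ f[0], f[1], ..., f[n-2] ]
--     # with the list elements satisfying
--     # f[0] < n, f[1] < n-1, ..., f[n-2] < 2
--     n = len(f)+1
--     for k in range(n-1):
--         if f[k] >= n-k:
--             return False
--     return True
--
-- def fact2int(f):
--     assert is_valid_fact(f)
--     result = 0
--     radix = 1
--     n = len(f)+1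
--     for k in range(n-1):
--         result += f[k]*radix
--         radix *= k+2
--     return result
-- ===== SOURCE B (Python) =====
-- def is_valid_fact(f):
--     n = len(f)+1
--     for k in range(n-1):
--         if f[k] >= n-k:
--             return False
--     return True
--
-- def fact2int(f):
--     assert is_valid_fact(f)
--     # Horner's rule back-to-front: result = f[k] + (k+2)*result nesting,
--     # realised with a decrementing multiplier instead of a running factorial.
--     result = 0
--     m = len(f) + 1
--     for x in reversed(f):
--         result = result * m + x
--         m -= 1
--     return result
-- ===== Notes on version B (the rewrite author's own statement) =====
-- stated objective: alternative
-- what changed: Replaces the forward loop with a running radix (factorial) accumulator by a back-to-front Horner-style structural recursion result = f[k] + (k+2)*rest, which keeps no radix variable.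
import Mathlib
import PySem

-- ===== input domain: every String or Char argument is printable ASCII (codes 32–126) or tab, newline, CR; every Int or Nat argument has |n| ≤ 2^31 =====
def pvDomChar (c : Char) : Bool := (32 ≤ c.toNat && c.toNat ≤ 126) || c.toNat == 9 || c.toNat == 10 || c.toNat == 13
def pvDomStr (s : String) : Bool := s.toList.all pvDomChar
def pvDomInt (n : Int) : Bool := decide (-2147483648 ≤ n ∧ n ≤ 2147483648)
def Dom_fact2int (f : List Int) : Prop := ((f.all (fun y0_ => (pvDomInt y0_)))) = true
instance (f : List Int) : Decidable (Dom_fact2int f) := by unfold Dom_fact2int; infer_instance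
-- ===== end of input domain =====

-- B replaces A's forward loop with a running factorial radix by a reversed Horner multiply-add loop with a decrementing multiplier (alternative decomposition, same cost).

-- ===== PORT A =====
-- forward loop: result += f[k]*radix; radix *= k+2
def fact2int (f : List Int) : Int :=
  let n : Int := (f.length : Int) + 1
  (((PySem.List.pyRange 0 (n - 1) 1).foldl
      (fun (p : Int × Int) k => (p.1 + (PySem.List.pyGetD f k 0) * p.2, p.2 * (k + 2)))
      (0, 1))).1

-- ===== PORT B =====
-- reversed Horner loop: result = result*m + x; m -= 1
def fact2int_alt (f : List Int) : Int :=
  (f.reverse.foldl (fun (p : Int × Int) x => (p.1 * p.2 + x, p.2 - 1))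
    (0, (f.length : Int) + 1)).1

-- ===== PRECONDITION & SPEC =====
-- A asserts is_valid_fact(f); inputs failing it raise AssertionError, so they lie outside Pre_.
def Pre_fact2int (f : List Int) : Prop :=
  ∀ k : Nat, (h : k < f.length) → f[k] < (f.length : Int) + 1 - k
instance (f : List Int) : Decidable (Pre_fact2int f) := by unfold Pre_fact2int; infer_instance

def pvWitness_fact2int : List Int := [1, 1, 0]

def Spec_fact2int (f : List Int) (out : Int) : Prop := out = fact2int_alt f
instance (f : List Int) (out : Int) : Decidable (Spec_fact2int f out) := by unfold Spec_fact2int; infer_instance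

-- ===== CLAIM (what is proved, stated in full; the proofs are below) =====
def Claim_equal_fact2int : Prop := ∀ (f : List Int), Dom_fact2int f → Pre_fact2int f → Spec_fact2int f (fact2int f)

-- ===== LEMMAS AND PROOFS =====

-- proof-side Horner characterisation bridging the two ports
def fact2intGo : List Int → Int → Int
  | [], _ => 0
  | x :: xs, k => x + (k + 2) * fact2intGo xs (k + 1)

-- folding A's loop body over the indices i..len-1 from state (r, rad) yields r + rad * Horner of the suffix
theorem fact2int_fold_eq (xs : List Int) : ∀ (f : List Int) (i : Nat) (r rad : Int),
    f.drop i = xs →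
    ((PySem.List.pyRange (i : Int) (f.length : Int) 1).foldl
      (fun (p : Int × Int) k => (p.1 + (PySem.List.pyGetD f k 0) * p.2, p.2 * (k + 2)))
      (r, rad)).1 = r + rad * fact2intGo xs (i : Int) := by
  induction xs with
  | nil =>
    intro f i r rad hdrop
    have hle : f.length ≤ i := by
      by_contra hlt
      push Not at hlt
      have := List.drop_eq_nil_iff.mp hdrop
      omega
    rw [PySem.List.pyRange_one_eq_nil (by exact_mod_cast hle)]
    simp [fact2intGo]
  | cons x xs ih =>
    intro f i r rad hdrop
    have hlt : i < f.length := by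
      by_contra hge
      push Not at hge
      rw [List.drop_eq_nil_iff.mpr hge] at hdrop
      simp at hdrop
    have hget : PySem.List.pyGetD f (i : Int) 0 = x := by
      have h0 : f[(i : Nat)]? = some x := by
        have h := congrArg (fun l : List Int => l[0]?) hdrop
        simpa using h
      rw [PySem.List.pyGetD_eq_getElem f 0 (by exact_mod_cast Int.natCast_nonneg i)
        (by exact_mod_cast hlt)]
      rw [List.getElem?_eq_getElem (by simpa using hlt)] at h0
      simpa using h0
    have hdrop' : f.drop (i + 1) = xs := by
      have h1 : (f.drop i).drop 1 = xs := by rw [hdrop]; rfl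
      rw [List.drop_drop] at h1
      simpa [Nat.add_comm] using h1
    rw [PySem.List.pyRange_one_cons (by exact_mod_cast hlt)]
    simp only [List.foldl_cons]
    have hcast : ((i : Int) + 1) = ((i + 1 : Nat) : Int) := by push_cast; ring
    rw [hcast, ih f (i + 1) _ _ hdrop']
    simp [fact2intGo, hget]
    ring


-- B's reversed fold, viewed as a foldr, computes the Horner value with multiplier k+1+len
theorem fact2int_foldr_eq (xs : List Int) : ∀ (k : Int),
    xs.foldr (fun x (p : Int × Int) => (p.1 * p.2 + x, p.2 - 1)) (0, k + 1 + xs.length)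
      = (fact2intGo xs k, k + 1) := by
  induction xs with
  | nil => intro k; simp [fact2intGo]
  | cons x xs ih =>
    intro k
    have h : (k + 1 + ((x :: xs).length : Int)) = (k + 1) + 1 + xs.length := by
      simp; ring
    rw [List.foldr_cons, h, ih (k + 1)]
    simp [fact2intGo]
    ring

-- ===== VERDICT (by name: the statement is the Claim_ definition above) =====
theorem fact2int_spec : Claim_equal_fact2int := by
  intro f _ _
  unfold Spec_fact2int fact2int fact2int_alt
  simp only [add_sub_cancel_right, List.foldl_reverse]
  have hA := fact2int_fold_eq f f 0 0 1 (by simp)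
  have hB := fact2int_foldr_eq f 0
  rw [show ((f.length : Int) + 1) = 0 + 1 + f.length by ring, hB]
  simpa using hA
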